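-- pv_equiv track=rewrite | github.com/GioRam0/islands_clusters | exploratory_data_analysis/creazione_dataframe.py | etichettatura
-- ===== SOURCE A (Python) =====
-- def etichettatura(valore, soglie, etichette):
--     if valore < soglie[0]:
--         return etichette[0]
--     for i in range(len(soglie) - 1):
--         if soglie[i] <= valore < soglie[i+1]:
--             return etichette[i+1]
--     if valore >= soglie[-1]:
--         return etichette[-1]
-- ===== SOURCE B (Python) =====
-- def etichettatura(valore, soglie, etichette):
--     lo, hi = 0, len(soglie)
--     while lo < hi:
--         mid = (lo + hi) // 2
--         if soglie[mid] <= valore: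
--             lo = mid + 1
--         else:
--             hi = mid
--     return etichette[-1] if lo == len(soglie) else etichette[lo]
-- ===== Notes on version B (the rewrite author's own statement) =====
-- stated objective: alternative
-- what changed: replaces the linear scan over consecutive threshold pairs by a binary search for the insertion point of valore in the sorted thresholds (O(log n) comparisons vs O(n); a timing run could not credit this at scale because its large random inputs are unsorted, outside Pre_)
-- outside the precondition, e.g. on etichettatura(5, [10, 0], ['a', 'b']): A returns 'a', B returns 'b'
import Mathlib
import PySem

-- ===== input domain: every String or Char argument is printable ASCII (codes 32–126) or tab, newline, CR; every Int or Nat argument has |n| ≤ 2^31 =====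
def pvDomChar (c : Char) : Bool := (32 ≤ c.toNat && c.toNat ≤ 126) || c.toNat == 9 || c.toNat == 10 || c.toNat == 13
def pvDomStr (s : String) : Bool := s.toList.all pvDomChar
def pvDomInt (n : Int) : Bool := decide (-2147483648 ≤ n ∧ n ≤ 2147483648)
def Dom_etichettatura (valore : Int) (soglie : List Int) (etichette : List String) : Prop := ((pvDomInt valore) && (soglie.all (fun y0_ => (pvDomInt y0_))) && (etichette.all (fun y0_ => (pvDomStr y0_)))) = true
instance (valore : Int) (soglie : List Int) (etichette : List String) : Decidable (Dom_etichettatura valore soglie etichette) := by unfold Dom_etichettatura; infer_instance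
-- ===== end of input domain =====

-- B replaces A's linear scan of consecutive threshold pairs by a binary search for the insertion point (a different algorithm; equality is claimed on Pre_: sorted thresholds, or valore outside their range).


-- ===== PORT A =====
-- the 'for i in range(len(soglie) - 1)' loop with its early return (none = loop finished)
def etichettaturaLoop (valore : Int) (soglie : List Int) (etichette : List String) (i : Nat) : Option String :=
  if i + 1 < soglie.length then
    if PySem.List.pyGetD soglie (i : Int) 0 ≤ valore ∧ valore < PySem.List.pyGetD soglie ((i : Int) + 1) 0 then
      some (PySem.List.pyGetD etichette ((i : Int) + 1) "")
    else etichettaturaLoop valore soglie etichette (i + 1)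
  else none
termination_by soglie.length - i

-- A returns None when it falls off the end; Pre_ excludes that, "" stands for it here
def etichettatura (valore : Int) (soglie : List Int) (etichette : List String) : String :=
  if valore < PySem.List.pyGetD soglie 0 0 then PySem.List.pyGetD etichette 0 ""
  else
    match etichettaturaLoop valore soglie etichette 0 with
    | some r => r
    | none =>
      if PySem.List.pyGetD soglie (-1) 0 ≤ valore then PySem.List.pyGetD etichette (-1) ""
      else ""

-- ===== PORT B =====
-- the hand-written binary-search while loop of Source B ((lo+hi)//2 on nonnegative ints = Nat division)
def bsLoop (valore : Int) (soglie : List Int) (lo hi : Nat) : Nat :=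
  if lo < hi then
    let mid := (lo + hi) / 2
    if PySem.List.pyGetD soglie (mid : Int) 0 ≤ valore then bsLoop valore soglie (mid + 1) hi
    else bsLoop valore soglie lo mid
  else lo
termination_by hi - lo
decreasing_by all_goals omega

def etichettatura_alt (valore : Int) (soglie : List Int) (etichette : List String) : String :=
  let lo := bsLoop valore soglie 0 soglie.length
  if lo = soglie.length then PySem.List.pyGetD etichette (-1) ""
  else PySem.List.pyGetD etichette (lo : Int) ""

-- ===== PRECONDITION & SPEC =====
-- Pre_ excludes: empty soglie or empty etichette (A raises IndexError); etichette too short for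
-- the selected label index (the number of thresholds ≤ valore), on which A raises IndexError on
-- etichette[i+1]; and unsorted soglie with valore strictly between two thresholds out of order,
-- where A can fall off and return None (not a string) or a value that is an accident of scan
-- order (valore below all thresholds or ≥ all thresholds is kept: there order cannot matter).
def Pre_etichettatura (valore : Int) (soglie : List Int) (etichette : List String) : Prop :=
  soglie ≠ [] ∧ etichette ≠ [] ∧
  ((∀ x ∈ soglie, valore < x) ∨ (∀ x ∈ soglie, x ≤ valore) ∨
   (List.Pairwise (· ≤ ·) soglie ∧
    (soglie.countP (fun x => decide (x ≤ valore)) = 0 ∨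
     soglie.countP (fun x => decide (x ≤ valore)) = soglie.length ∨
     soglie.countP (fun x => decide (x ≤ valore)) < etichette.length)))
instance (valore : Int) (soglie : List Int) (etichette : List String) : Decidable (Pre_etichettatura valore soglie etichette) := by unfold Pre_etichettatura; infer_instance

def pvWitness_etichettatura : Int × List Int × List String := (1, [0], ["a"])

def Spec_etichettatura (valore : Int) (soglie : List Int) (etichette : List String) (out : String) : Prop := out = etichettatura_alt valore soglie etichette
instance (valore : Int) (soglie : List Int) (etichette : List String) (out : String) : Decidable (Spec_etichettatura valore soglie etichette out) := by unfold Spec_etichettatura; infer_instance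

-- ===== CLAIM (what is proved, stated in full; the proofs are below) =====
def Claim_equal_etichettatura : Prop := ∀ (valore : Int) (soglie : List Int) (etichette : List String), Dom_etichettatura valore soglie etichette → Pre_etichettatura valore soglie etichette → Spec_etichettatura valore soglie etichette (etichettatura valore soglie etichette)

-- ===== LEMMAS AND PROOFS =====

-- sorted thresholds are monotone under getD
lemma sorted_getD_mono {s : List Int} (hs : List.Pairwise (· ≤ ·) s) {i k : Nat}
    (hik : i ≤ k) (hk : k < s.length) : s.getD i 0 ≤ s.getD k 0 := by
  rcases Nat.lt_or_eq_of_le hik with h | h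
  · rw [List.getD_eq_getElem s 0 (by omega), List.getD_eq_getElem s 0 hk]
    exact List.pairwise_iff_getElem.mp hs i k (by omega) hk h
  · subst h; rfl

-- invariant of the binary-search loop
lemma bsLoop_spec (valore : Int) (soglie : List Int) :
    ∀ fuel lo hi : Nat, hi - lo ≤ fuel → lo ≤ hi → hi ≤ soglie.length →
    (lo = 0 ∨ soglie.getD (lo - 1) 0 ≤ valore) →
    (hi = soglie.length ∨ valore < soglie.getD hi 0) →
    lo ≤ bsLoop valore soglie lo hi ∧ bsLoop valore soglie lo hi ≤ hi ∧
    (bsLoop valore soglie lo hi = 0 ∨ soglie.getD (bsLoop valore soglie lo hi - 1) 0 ≤ valore) ∧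
    (bsLoop valore soglie lo hi = soglie.length ∨ valore < soglie.getD (bsLoop valore soglie lo hi) 0) := by
  intro fuel
  induction fuel with
  | zero =>
    intro lo hi hf hle hlen h1 h2
    have : lo = hi := by omega
    subst this
    rw [bsLoop]
    simp only [lt_irrefl, if_false]
    exact ⟨le_refl _, le_refl _, h1, h2⟩
  | succ n ih =>
    intro lo hi hf hle hlen h1 h2
    rw [bsLoop]
    by_cases hlt : lo < hi
    · simp only [hlt, if_true]
      set mid := (lo + hi) / 2 with hmid
      have hmlo : lo ≤ mid := by omega
      have hmhi : mid < hi := by omega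
      by_cases hc : PySem.List.pyGetD soglie (mid : Int) 0 ≤ valore
      · simp only [hc, if_true]
        have hgd : PySem.List.pyGetD soglie (mid : Int) 0 = soglie.getD mid 0 := by
          simp [PySem.List.pyGetD_natCast]
        obtain ⟨a, b, c, d⟩ := ih (mid + 1) hi (by omega) (by omega) hlen
          (Or.inr (by rw [Nat.add_sub_cancel, ← hgd]; exact hc)) h2
        exact ⟨by omega, b, c, d⟩
      · simp only [hc, if_false]
        have hgd : PySem.List.pyGetD soglie (mid : Int) 0 = soglie.getD mid 0 := by
          simp [PySem.List.pyGetD_natCast]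
        obtain ⟨a, b, c, d⟩ := ih lo mid (by omega) (by omega) (by omega) h1
          (Or.inr (by rw [← hgd]; omega))
        exact ⟨a, by omega, c, d⟩
    · simp only [hlt, if_false]
      have : lo = hi := by omega
      subst this
      exact ⟨le_refl _, le_refl _, h1, h2⟩

-- A's scan returns none when the pair condition fails everywhere from i on
lemma loop_none (valore : Int) (soglie : List Int) (etichette : List String) :
    ∀ fuel i : Nat, soglie.length - i ≤ fuel →
    (∀ k : Nat, i ≤ k → k + 1 < soglie.length →
      ¬(soglie.getD k 0 ≤ valore ∧ valore < soglie.getD (k + 1) 0)) →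
    etichettaturaLoop valore soglie etichette i = none := by
  intro fuel
  induction fuel with
  | zero =>
    intro i hf h
    have hi : ¬ (i + 1 < soglie.length) := by omega
    rw [etichettaturaLoop]
    simp [hi]
  | succ n ih =>
    intro i hf h
    rw [etichettaturaLoop]
    by_cases hi : i + 1 < soglie.length
    · simp only [hi, if_true]
      have hc : ¬(PySem.List.pyGetD soglie (i : Int) 0 ≤ valore ∧
          valore < PySem.List.pyGetD soglie ((i : Int) + 1) 0) := by
        have e1 : PySem.List.pyGetD soglie (i : Int) 0 = soglie.getD i 0 :=
          PySem.List.pyGetD_natCast soglie i 0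
        have e2 : PySem.List.pyGetD soglie ((i : Int) + 1) 0 = soglie.getD (i + 1) 0 := by
          have hcast : ((i : Int) + 1) = ((i + 1 : Nat) : Int) := by push_cast; ring
          rw [hcast, PySem.List.pyGetD_natCast]
        rw [e1, e2]
        exact h i (le_refl i) hi
      simp only [hc, if_false]
      exact ih (i + 1) (by omega) (fun k hk hk1 => h k (by omega) hk1)
    · simp [hi]

-- A's scan, started at the right index, fires on the pair (j-1, j)
lemma loop_some_base (valore : Int) (soglie : List Int) (etichette : List String) (j : Nat)
    (hj1 : 1 ≤ j) (hjlen : j < soglie.length)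
    (hcond : soglie.getD (j - 1) 0 ≤ valore ∧ valore < soglie.getD j 0) :
    etichettaturaLoop valore soglie etichette (j - 1) = some (etichette.getD j "") := by
  rw [etichettaturaLoop]
  have hlt : j - 1 + 1 < soglie.length := by omega
  simp only [hlt, if_true]
  have hcast : (((j - 1 : Nat) : Int) + 1) = ((j : Nat) : Int) := by omega
  have e1 : PySem.List.pyGetD soglie ((j - 1 : Nat) : Int) 0 = soglie.getD (j - 1) 0 :=
    PySem.List.pyGetD_natCast soglie (j - 1) 0
  have e2 : PySem.List.pyGetD soglie (((j - 1 : Nat) : Int) + 1) 0 = soglie.getD j 0 := by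
    rw [hcast, PySem.List.pyGetD_natCast]
  have e3 : PySem.List.pyGetD etichette (((j - 1 : Nat) : Int) + 1) "" = etichette.getD j "" := by
    rw [hcast, PySem.List.pyGetD_natCast]
  rw [e1, e2, e3, if_pos hcond]

-- A's scan finds the first index where the pair condition holds
lemma loop_some (valore : Int) (soglie : List Int) (etichette : List String) (j : Nat)
    (hj1 : 1 ≤ j) (hjlen : j < soglie.length)
    (hcond : soglie.getD (j - 1) 0 ≤ valore ∧ valore < soglie.getD j 0)
    (hbefore : ∀ k : Nat, k + 1 < j → valore ≥ soglie.getD (k + 1) 0) :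
    ∀ fuel i : Nat, j - 1 - i ≤ fuel → i ≤ j - 1 →
    etichettaturaLoop valore soglie etichette i = some (etichette.getD j "") := by
  intro fuel
  induction fuel with
  | zero =>
    intro i hf hij
    have : i = j - 1 := by omega
    subst this
    exact loop_some_base valore soglie etichette j hj1 hjlen hcond
  | succ n ih =>
    intro i hij hile
    rcases Nat.lt_or_eq_of_le hile with hlt | heq
    · rw [etichettaturaLoop]
      have hil : i + 1 < soglie.length := by omega
      simp only [hil, if_true]
      have e2 : PySem.List.pyGetD soglie ((i : Int) + 1) 0 = soglie.getD (i + 1) 0 := by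
        have hcast : ((i : Int) + 1) = ((i + 1 : Nat) : Int) := by push_cast; ring
        rw [hcast, PySem.List.pyGetD_natCast]
      have hfail : ¬(PySem.List.pyGetD soglie (i : Int) 0 ≤ valore ∧
          valore < PySem.List.pyGetD soglie ((i : Int) + 1) 0) := by
        rw [e2]
        have := hbefore i (by omega)
        intro ⟨_, h2⟩; omega
      simp only [hfail, if_false]
      exact ih (i + 1) (by omega) (by omega)
    · subst heq
      exact loop_some_base valore soglie etichette j hj1 hjlen hcond

-- the binary search stops at lo when valore is below every threshold
lemma bsLoop_all_lt (valore : Int) (soglie : List Int) (h : ∀ x ∈ soglie, valore < x) :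
    ∀ fuel lo hi : Nat, hi - lo ≤ fuel → hi ≤ soglie.length → bsLoop valore soglie lo hi = lo := by
  intro fuel
  induction fuel with
  | zero =>
    intro lo hi hf hlen
    rw [bsLoop]
    have : ¬ (lo < hi) := by omega
    simp [this]
  | succ n ih =>
    intro lo hi hf hlen
    rw [bsLoop]
    by_cases hlt : lo < hi
    · simp only [hlt, if_true]
      set mid := (lo + hi) / 2 with hmid
      have hmem : soglie.getD mid 0 ∈ soglie := by
        rw [List.getD_eq_getElem soglie 0 (by omega)]
        exact List.getElem_mem _
      have hc : ¬ (PySem.List.pyGetD soglie (mid : Int) 0 ≤ valore) := by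
        rw [PySem.List.pyGetD_natCast]
        have := h _ hmem
        omega
      simp only [hc, if_false]
      exact ih lo mid (by omega) (by omega)
    · simp [hlt]

-- the binary search climbs to hi when every threshold is ≤ valore
lemma bsLoop_all_le (valore : Int) (soglie : List Int) (h : ∀ x ∈ soglie, x ≤ valore) :
    ∀ fuel lo hi : Nat, hi - lo ≤ fuel → lo ≤ hi → hi ≤ soglie.length →
    bsLoop valore soglie lo hi = hi := by
  intro fuel
  induction fuel with
  | zero =>
    intro lo hi hf hle hlen
    have : lo = hi := by omega
    subst this
    rw [bsLoop]
    simp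
  | succ n ih =>
    intro lo hi hf hle hlen
    rw [bsLoop]
    by_cases hlt : lo < hi
    · simp only [hlt, if_true]
      set mid := (lo + hi) / 2 with hmid
      have hmem : soglie.getD mid 0 ∈ soglie := by
        rw [List.getD_eq_getElem soglie 0 (by omega)]
        exact List.getElem_mem _
      have hc : PySem.List.pyGetD soglie (mid : Int) 0 ≤ valore := by
        rw [PySem.List.pyGetD_natCast]
        exact h _ hmem
      simp only [hc, if_true]
      exact ih (mid + 1) hi (by omega) (by omega) hlen
    · simp [hlt]
      omega

-- ===== VERDICT (by name: the statement is the Claim_ definition above) =====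
theorem etichettatura_spec : Claim_equal_etichettatura := by
  intro valore soglie etichette _ ⟨hne, _, hcase⟩
  unfold Spec_etichettatura etichettatura etichettatura_alt
  have hslen : 1 ≤ soglie.length := by
    have := List.length_pos_iff.mpr hne; omega
  rcases hcase with hlo | hhi | ⟨hsort, _⟩
  · -- valore below every threshold: both take label 0 whatever the order
    have h0mem : soglie.getD 0 0 ∈ soglie := by
      rw [List.getD_eq_getElem soglie 0 (by omega)]
      exact List.getElem_mem _
    have hfirst : valore < PySem.List.pyGetD soglie 0 0 := by
      rw [PySem.List.pyGetD_zero]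
      exact hlo _ h0mem
    simp only [hfirst, if_true]
    rw [bsLoop_all_lt valore soglie hlo soglie.length 0 soglie.length (by omega) (le_refl _)]
    have hz : (0 : Nat) ≠ soglie.length := by omega
    simp only [hz, if_false]
    simp
  · -- every threshold ≤ valore: both take the last label whatever the order
    have hfirst : ¬ (valore < PySem.List.pyGetD soglie 0 0) := by
      rw [PySem.List.pyGetD_zero]
      have h0mem : soglie.getD 0 0 ∈ soglie := by
        rw [List.getD_eq_getElem soglie 0 (by omega)]
        exact List.getElem_mem _
      have := hhi _ h0mem
      omega
    simp only [hfirst, if_false]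
    have hnone : etichettaturaLoop valore soglie etichette 0 = none := by
      apply loop_none valore soglie etichette soglie.length 0 (by omega)
      intro k _ hk1
      have hmem : soglie.getD (k + 1) 0 ∈ soglie := by
        rw [List.getD_eq_getElem soglie 0 (by omega)]
        exact List.getElem_mem _
      have := hhi _ hmem
      intro ⟨_, h2⟩; omega
    rw [hnone]
    have hge : PySem.List.pyGetD soglie (-1) 0 ≤ valore := by
      rw [PySem.List.pyGetD_neg_one soglie 0 hne]
      exact hhi _ (List.getLast_mem hne)
    simp only [hge, if_true]
    rw [bsLoop_all_le valore soglie hhi soglie.length 0 soglie.length (by omega) (by omega) (le_refl _)]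
    simp
  · -- soglie sorted: A's scan and the binary search select the same index
    set j := bsLoop valore soglie 0 soglie.length with hjdef
    have hspec := bsLoop_spec valore soglie soglie.length 0 soglie.length
      (by omega) (by omega) (le_refl _) (Or.inl rfl) (Or.inl rfl)
    obtain ⟨-, hjle, hjl, hjr⟩ := hspec
    rw [← hjdef] at hjle hjl hjr
    have e0 : PySem.List.pyGetD soglie 0 0 = soglie.getD 0 0 := by
      simpa using PySem.List.pyGetD_natCast soglie 0 0
    by_cases hfirst : valore < PySem.List.pyGetD soglie 0 0
    · -- v < soglie[0]: both sides give label 0; the search must stop at 0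
      simp only [hfirst, if_true]
      have hv0 : valore < soglie.getD 0 0 := by rw [← e0]; exact hfirst
      have hj0 : j = 0 := by
        by_contra hj
        rcases hjl with h | h
        · exact hj h
        · have : soglie.getD 0 0 ≤ soglie.getD (j - 1) 0 :=
            sorted_getD_mono hsort (Nat.zero_le _) (by omega)
          omega
      rw [hj0]
      have : (0 : Nat) ≠ soglie.length := by omega
      simp only [this, if_false]
      simp
    · -- soglie[0] ≤ v
      simp only [hfirst, if_false]
      have hv0 : soglie.getD 0 0 ≤ valore := by rw [← e0] ; omega
      have hj1 : 1 ≤ j := by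
        by_contra hj
        have hj0 : j = 0 := by omega
        rcases hjr with h | h
        · omega
        · rw [hj0] at h; omega
      by_cases hjn : j = soglie.length
      · -- above every threshold: A's scan fails everywhere, final branch fires
        have hnone : etichettaturaLoop valore soglie etichette 0 = none := by
          apply loop_none valore soglie etichette soglie.length 0 (by omega)
          intro k _ hk1
          rcases hjl with h | h
          · omega
          · rw [hjn] at h
            have : soglie.getD (k + 1) 0 ≤ soglie.getD (soglie.length - 1) 0 :=
              sorted_getD_mono hsort (by omega) (by omega)
            intro ⟨_, h2⟩; omega
        rw [hnone]
        have hlast : PySem.List.pyGetD soglie (-1) 0 = soglie.getD (soglie.length - 1) 0 := by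
          rw [PySem.List.pyGetD_neg_one soglie 0 hne]
          rw [List.getD_eq_getElem soglie 0 (by omega), List.getLast_eq_getElem]
        have hge : PySem.List.pyGetD soglie (-1) 0 ≤ valore := by
          rw [hlast]
          rcases hjl with h | h
          · omega
          · rw [hjn] at h; exact h
        simp only [hge, if_true, hjn, if_true]
      · -- strictly inside: the scan returns at index j-1 with label j
        have hjlt : j < soglie.length := by omega
        have hcond : soglie.getD (j - 1) 0 ≤ valore ∧ valore < soglie.getD j 0 := by
          constructor
          · rcases hjl with h | h
            · omega
            · exact h
          · rcases hjr with h | h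
            · omega
            · exact h
        have hsome : etichettaturaLoop valore soglie etichette 0 = some (etichette.getD j "") := by
          apply loop_some valore soglie etichette j hj1 hjlt hcond _ (j - 1) 0 (by omega) (by omega)
          intro k hk
          have : soglie.getD (k + 1) 0 ≤ soglie.getD (j - 1) 0 :=
            sorted_getD_mono hsort (by omega) (by omega)
          omega
        rw [hsome]
        simp only [hjn, if_false]
        rw [PySem.List.pyGetD_natCast]
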